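-- pv_equiv track=rewrite | github.com/aaaronmiller/datakiln | backend/app/api/v1/endpoints/selectors.py | _validate_css_selector
-- ===== SOURCE A (Python) =====
-- from typing import Dict, Any, Optional, List
--
-- def _validate_css_selector(selector: str) -> List[str]:
--     """Basic CSS selector validation"""
--     issues = []
--
--     # Check for obviously invalid patterns
--     if ">>" in selector:
--         issues.append("Invalid '>>' in CSS selector (use space or >)")
--
--     if selector.count("(") != selector.count(")"):
--         issues.append("Unmatched parentheses")
--
--     if selector.count("[") != selector.count("]"):
--         issues.append("Unmatched square brackets")
--
--     # Check for common invalid characters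
--     invalid_chars = ["<", ">", '"', "'"]
--     for char in invalid_chars:
--         if char in selector:
--             issues.append(f"Invalid character '{char}' in CSS selector")
--
--     return issues
-- ===== SOURCE B (Python) =====
-- def _validate_css_selector(selector: str):
--     """Single stateful pass over the selector instead of several library scans."""
--     op = cp = ob = cb = 0
--     prev_gt = False
--     gg = seen_lt = seen_gt = seen_dq = seen_sq = False
--     for c in selector:
--         if c == '(':
--             op += 1
--         elif c == ')':
--             cp += 1
--         elif c == '[':
--             ob += 1
--         elif c == ']':
--             cb += 1
--         if c == '>':
--             if prev_gt:
--                 gg = True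
--             seen_gt = True
--         elif c == '<':
--             seen_lt = True
--         elif c == '"':
--             seen_dq = True
--         elif c == "'":
--             seen_sq = True
--         prev_gt = (c == '>')
--     issues = []
--     if gg:
--         issues.append("Invalid '>>' in CSS selector (use space or >)")
--     if op != cp:
--         issues.append("Unmatched parentheses")
--     if ob != cb:
--         issues.append("Unmatched square brackets")
--     for ch, seen in (("<", seen_lt), (">", seen_gt), ('"', seen_dq), ("'", seen_sq)):
--         if seen:
--             issues.append(f"Invalid character '{ch}' in CSS selector")
--     return issues
-- ===== Notes on version B (the rewrite author's own statement) =====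
-- stated objective: alternative
-- what changed: A runs several independent library scans over the selector (a substring search plus four count scans and four membership scans); B makes one explicit pass maintaining paren/bracket counters, a repeated-combinator flag and seen-character flags, then emits the same messages in the same fixed order.
import Mathlib
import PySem

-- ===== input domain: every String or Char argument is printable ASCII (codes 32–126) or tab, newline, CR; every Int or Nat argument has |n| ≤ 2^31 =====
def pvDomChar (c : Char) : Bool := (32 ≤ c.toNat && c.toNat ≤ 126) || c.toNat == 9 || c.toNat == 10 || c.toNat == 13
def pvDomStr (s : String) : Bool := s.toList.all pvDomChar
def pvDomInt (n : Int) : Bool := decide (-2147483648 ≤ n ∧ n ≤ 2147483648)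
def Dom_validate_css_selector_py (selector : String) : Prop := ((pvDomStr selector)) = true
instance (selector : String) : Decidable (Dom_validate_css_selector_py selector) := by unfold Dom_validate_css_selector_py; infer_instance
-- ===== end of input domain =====

-- B replaces A's several independent library scans (substring search + four .count/in scans)
-- by ONE stateful pass over the string; objective: alternative decomposition (same O(n) cost).

-- ===== PORT A =====
def validate_css_selector_py (selector : String) : List String :=
  let issues : List String := []
  let issues := if PySem.Str.isIn ">>" selector then
      issues ++ ["Invalid '>>' in CSS selector (use space or >)"] else issues
  let issues := if PySem.Str.count selector "(" ≠ PySem.Str.count selector ")" then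
      issues ++ ["Unmatched parentheses"] else issues
  let issues := if PySem.Str.count selector "[" ≠ PySem.Str.count selector "]" then
      issues ++ ["Unmatched square brackets"] else issues
  let invalid_chars : List String := ["<", ">", "\"", "'"]
  invalid_chars.foldl (fun issues ch =>
    if PySem.Str.isIn ch selector then
      issues ++ ["Invalid character '" ++ ch ++ "' in CSS selector"] else issues) issues

-- ===== PORT B =====
structure VState where
  op : Nat
  cp : Nat
  ob : Nat
  cb : Nat
  prevGt : Bool
  gg : Bool
  seenLt : Bool
  seenGt : Bool
  seenDq : Bool
  seenSq : Bool
deriving Repr, DecidableEq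

def vstep (st : VState) (c : Char) : VState :=
  { op := if c = '(' then st.op + 1 else st.op
    cp := if c = ')' then st.cp + 1 else st.cp
    ob := if c = '[' then st.ob + 1 else st.ob
    cb := if c = ']' then st.cb + 1 else st.cb
    prevGt := c = '>'
    gg := st.gg || (st.prevGt && c = '>')
    seenLt := st.seenLt || c = '<'
    seenGt := st.seenGt || c = '>'
    seenDq := st.seenDq || c = '"'
    seenSq := st.seenSq || c = '\'' }

def validate_css_selector_py_alt (selector : String) : List String :=
  let st := selector.toList.foldl vstep ⟨0, 0, 0, 0, false, false, false, false, false, false⟩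
  (if st.gg then ["Invalid '>>' in CSS selector (use space or >)"] else []) ++
  (if st.op ≠ st.cp then ["Unmatched parentheses"] else []) ++
  (if st.ob ≠ st.cb then ["Unmatched square brackets"] else []) ++
  (if st.seenLt then ["Invalid character '<' in CSS selector"] else []) ++
  (if st.seenGt then ["Invalid character '>' in CSS selector"] else []) ++
  (if st.seenDq then ["Invalid character '\"' in CSS selector"] else []) ++
  (if st.seenSq then ["Invalid character ''' in CSS selector"] else [])

-- ===== PRECONDITION & SPEC =====
def Spec_validate_css_selector_py (selector : String) (out : List String) : Prop := out = validate_css_selector_py_alt selector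
instance (selector : String) (out : List String) : Decidable (Spec_validate_css_selector_py selector out) := by unfold Spec_validate_css_selector_py; infer_instance

-- ===== CLAIM (what is proved, stated in full; the proofs are below) =====
def Claim_equal_validate_css_selector_py : Prop := ∀ (selector : String), Dom_validate_css_selector_py selector → Spec_validate_css_selector_py selector (validate_css_selector_py selector)

-- ===== LEMMAS AND PROOFS =====

-- ">>" seen as an adjacent pair, B's way (helper for the gg characterisation)
def ggAfter (prev : Bool) : List Char → Bool
  | [] => false
  | c :: t => (prev && c = '>') || ggAfter (c = '>') t

theorem fold_op (cs : List Char) : ∀ st : VState,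
    (cs.foldl vstep st).op = st.op + cs.count '(' := by
  induction cs with
  | nil => simp
  | cons c t ih =>
    intro st
    simp only [List.foldl_cons, ih, vstep, List.count_cons]
    by_cases h : c = '(' <;> simp [h] <;> omega

theorem fold_cp (cs : List Char) : ∀ st : VState,
    (cs.foldl vstep st).cp = st.cp + cs.count ')' := by
  induction cs with
  | nil => simp
  | cons c t ih =>
    intro st
    simp only [List.foldl_cons, ih, vstep, List.count_cons]
    by_cases h : c = ')' <;> simp [h] <;> omega

theorem fold_ob (cs : List Char) : ∀ st : VState,
    (cs.foldl vstep st).ob = st.ob + cs.count '[' := by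
  induction cs with
  | nil => simp
  | cons c t ih =>
    intro st
    simp only [List.foldl_cons, ih, vstep, List.count_cons]
    by_cases h : c = '[' <;> simp [h] <;> omega

theorem fold_cb (cs : List Char) : ∀ st : VState,
    (cs.foldl vstep st).cb = st.cb + cs.count ']' := by
  induction cs with
  | nil => simp
  | cons c t ih =>
    intro st
    simp only [List.foldl_cons, ih, vstep, List.count_cons]
    by_cases h : c = ']' <;> simp [h] <;> omega

theorem fold_gg (cs : List Char) : ∀ st : VState,
    (cs.foldl vstep st).gg = (st.gg || ggAfter st.prevGt cs) := by
  induction cs with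
  | nil => simp [ggAfter]
  | cons c t ih =>
    intro st
    simp only [List.foldl_cons, ih, vstep, ggAfter, Bool.or_assoc]

theorem fold_seenLt (cs : List Char) : ∀ st : VState,
    (cs.foldl vstep st).seenLt = (st.seenLt || decide ('<' ∈ cs)) := by
  induction cs with
  | nil => simp
  | cons c t ih =>
    intro st
    simp only [List.foldl_cons, ih, vstep, List.mem_cons]
    by_cases h : c = '<' <;> simp [h, eq_comm]

theorem fold_seenGt (cs : List Char) : ∀ st : VState,
    (cs.foldl vstep st).seenGt = (st.seenGt || decide ('>' ∈ cs)) := by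
  induction cs with
  | nil => simp
  | cons c t ih =>
    intro st
    simp only [List.foldl_cons, ih, vstep, List.mem_cons]
    by_cases h : c = '>' <;> simp [h, eq_comm]

theorem fold_seenDq (cs : List Char) : ∀ st : VState,
    (cs.foldl vstep st).seenDq = (st.seenDq || decide ('"' ∈ cs)) := by
  induction cs with
  | nil => simp
  | cons c t ih =>
    intro st
    simp only [List.foldl_cons, ih, vstep, List.mem_cons]
    by_cases h : c = '"' <;> simp [h, eq_comm]

theorem fold_seenSq (cs : List Char) : ∀ st : VState,
    (cs.foldl vstep st).seenSq = (st.seenSq || decide ('\'' ∈ cs)) := by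
  induction cs with
  | nil => simp
  | cons c t ih =>
    intro st
    simp only [List.foldl_cons, ih, vstep, List.mem_cons]
    by_cases h : c = '\'' <;> simp [h, eq_comm]

theorem ggAfter_true (cs : List Char) :
    ggAfter true cs = (decide (cs.head? = some '>') || ggAfter false cs) := by
  cases cs with
  | nil => simp [ggAfter]
  | cons c t => by_cases h : c = '>' <;> simp [ggAfter, h]

theorem ggAfter_false_iff (cs : List Char) :
    ggAfter false cs = true ↔ ['>', '>'] <:+: cs := by
  induction cs with
  | nil => simp [ggAfter]
  | cons c t ih =>
    rw [List.infix_cons_iff]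
    simp only [ggAfter, Bool.false_and, Bool.false_or]
    by_cases h : c = '>'
    · subst h
      rw [show (decide ('>' = '>')) = true from by decide, ggAfter_true, Bool.or_eq_true,
        decide_eq_true_eq, ih]
      constructor
      · rintro (hh | hi)
        · left
          cases t with
          | nil => exact absurd hh (by simp)
          | cons b tt =>
            simp only [List.head?_cons, Option.some.injEq] at hh
            subst hh
            exact ⟨tt, rfl⟩
        · right; exact hi
      · rintro (⟨r, hr⟩ | hi)
        · left
          have : t = '>' :: r := by
            have h2 := hr
            simp only [List.cons_append, List.nil_append, List.cons.injEq] at h2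
            exact h2.2.symm
          subst this
          simp
        · right; exact hi
    · rw [show (decide (c = '>')) = false from decide_eq_false h, ih]
      constructor
      · intro hi; right; exact hi
      · rintro (⟨r, hr⟩ | hi)
        · exfalso
          simp only [List.cons_append, List.cons.injEq] at hr
          exact h hr.1.symm
        · exact hi

-- Python's single-char substring count is the character count
theorem count_go_singleton (c : Char) (cs : List Char) : ∀ (fuel acc : Nat),
    cs.length ≤ fuel → PySem.Chars.count.go [c] fuel cs acc = acc + cs.count c := by
  induction cs with
  | nil => intro fuel acc _; cases fuel; simp [PySem.Chars.count.go]; simp [PySem.Chars.count.go]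
  | cons b t ih =>
    intro fuel acc hf
    cases fuel with
    | zero => simp at hf
    | succ n =>
      simp only [List.length_cons] at hf
      by_cases h : b = c
      · subst h
        rw [PySem.Chars.count.go]
        simp only [List.isPrefixOf, beq_self_eq_true, Bool.true_and,
          if_true, List.length_cons, List.length_nil, List.drop_succ_cons, List.drop_zero]
        rw [ih n (acc + 1) (by omega), List.count_cons_self]
        omega
      · have hb : (c == b) = false := beq_eq_false_iff_ne.mpr (fun e => h e.symm)
        rw [PySem.Chars.count.go]
        simp only [List.isPrefixOf, hb, Bool.false_and]
        rw [if_neg (by simp), ih n acc (by omega)]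
        simp [h]

theorem count_singleton (s : String) (c : Char) :
    PySem.Str.count s (String.ofList [c]) = s.toList.count c := by
  rw [PySem.Str.count, show (String.ofList [c]).toList = [c] from Eq.symm (String.ofList_eq.mp rfl), PySem.Chars.count,
    if_neg (by simp)]
  simpa using count_go_singleton c s.toList s.toList.length 0 (le_refl _)

theorem isIn_singleton (s : String) (c : Char) :
    PySem.Str.isIn (String.ofList [c]) s = decide (c ∈ s.toList) := by
  rw [Bool.eq_iff_iff, PySem.Str.isIn_iff_infix,
    show (String.ofList [c]).toList = [c] from Eq.symm (String.ofList_eq.mp rfl)]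
  simp [List.singleton_infix_iff]

theorem gg_eq_isIn (s : String) :
    (s.toList.foldl vstep ⟨0, 0, 0, 0, false, false, false, false, false, false⟩).gg
      = PySem.Str.isIn ">>" s := by
  rw [fold_gg, Bool.eq_iff_iff]
  simp only [Bool.false_or]
  rw [ggAfter_false_iff, PySem.Str.isIn_iff_infix,
    show (">>" : String).toList = ['>', '>'] from by decide]

-- reassociation of A's conditional appends into B's concatenation of blocks
theorem ite_app (c : Prop) [Decidable c] (l : List String) (x : String) :
    (if c then l ++ [x] else l) = l ++ (if c then [x] else []) := by
  split <;> simp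

-- ===== VERDICT (by name: the statement is the Claim_ definition above) =====
set_option maxHeartbeats 800000 in
theorem validate_css_selector_py_spec : Claim_equal_validate_css_selector_py := by
  intro selector _
  unfold Spec_validate_css_selector_py
  simp only [validate_css_selector_py, validate_css_selector_py_alt]
  rw [gg_eq_isIn, fold_op, fold_cp, fold_ob, fold_cb, fold_seenLt, fold_seenGt, fold_seenDq,
    fold_seenSq]
  have h1 : PySem.Str.count selector "(" = selector.toList.count '(' := count_singleton selector '('
  have h2 : PySem.Str.count selector ")" = selector.toList.count ')' := count_singleton selector ')'
  have h3 : PySem.Str.count selector "[" = selector.toList.count '[' := count_singleton selector '['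
  have h4 : PySem.Str.count selector "]" = selector.toList.count ']' := count_singleton selector ']'
  have i1 : PySem.Str.isIn "<" selector = decide ('<' ∈ selector.toList) := isIn_singleton selector '<'
  have i2 : PySem.Str.isIn ">" selector = decide ('>' ∈ selector.toList) := isIn_singleton selector '>'
  have i3 : PySem.Str.isIn "\"" selector = decide ('"' ∈ selector.toList) := isIn_singleton selector '"'
  have i4 : PySem.Str.isIn "'" selector = decide ('\'' ∈ selector.toList) := isIn_singleton selector '\''
  simp only [List.foldl_cons, List.foldl_nil, h1, h2, h3, h4, i1, i2, i3, i4]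
  simp only [Nat.zero_add]
  simp only [ite_app]
  simp [List.append_assoc]
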